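-- pv_equiv track=rewrite | github.com/nesfit/fitcrack | webadmin/fitcrackAPI/src/src/api/fitcrack/attacks/functions.py | compute_keyspace_from_mask_with_treshold
-- ===== SOURCE A (Python) =====
-- def compute_keyspace_from_mask_with_treshold(mask, markovTreshold, charsetsSize=[]):
--
--     keyspaceWithTreshhold = 1
--     nextCharSymbol = False
--     for char in mask:
--         if nextCharSymbol:
--
--             if keyspace_dict.get(char, None) <= markovTreshold:
--                     multiplier = keyspace_dict.get(char, None)
--             else:   multiplier = markovTreshold
--             try:
--                 if int(char) >= 1 and int(char) <= 4:
--                     multiplier = charsetsSize.get(int(char), None)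
--             except ValueError:
--                 pass
--
--             if not multiplier:
--                 continue
--             keyspaceWithTreshhold *= multiplier
--             nextCharSymbol = False
--             continue
--         if char == '?':
--             nextCharSymbol = True
--         else:
--             nextCharSymbol = False
--
--     return keyspaceWithTreshhold
--
-- keyspace_dict = {
--     'l': 26,
--     'u': 26,
--     'd': 10,
--     'h': 16,
--     'H': 16,
--     's': 33,
--     'a': 95,
--     'b': 256
-- }
-- ===== SOURCE B (Python) =====
-- keyspace_dict = {
--     'l': 26,
--     'u': 26,
--     'd': 10,
--     'h': 16,
--     'H': 16,
--     's': 33,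
--     'a': 95,
--     'b': 256
-- }
--
-- def compute_keyspace_from_mask_with_treshold(mask, markovTreshold, charsetsSize=[]):
--     # Each '?' consumes the following character as its charset symbol (non-overlapping,
--     # left to right); that symbol contributes min(keyspace_dict[symbol], markovTreshold),
--     # and a zero multiplier (threshold 0) is skipped.  The charsetsSize branch of the
--     # original is dead on its returning inputs: a scored digit makes it raise TypeError
--     # (None <= int) before the try block runs, so it is dropped here.
--     result = 1
--     it = iter(mask)
--     for ch in it:
--         if ch == '?':
--             sym = next(it, None)
--             if sym is None:
--                 break
--             m = min(keyspace_dict[sym], markovTreshold)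
--             if m:
--                 result *= m
--     return result
-- ===== Notes on version B (the rewrite author's own statement) =====
-- stated objective: simpler
-- what changed: Replaces A's sticky nextCharSymbol flag and its per-symbol dict-compare/try-except/charsetsSize block by a fused loop in which each '?' directly consumes the next character and multiplies in min(keyspace_dict[symbol], threshold); the int(char)/charsetsSize branch is dropped because a scored digit makes A raise TypeError before reaching it, so it is dead on A's returning inputs (excluded by Pre_).
import Mathlib
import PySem

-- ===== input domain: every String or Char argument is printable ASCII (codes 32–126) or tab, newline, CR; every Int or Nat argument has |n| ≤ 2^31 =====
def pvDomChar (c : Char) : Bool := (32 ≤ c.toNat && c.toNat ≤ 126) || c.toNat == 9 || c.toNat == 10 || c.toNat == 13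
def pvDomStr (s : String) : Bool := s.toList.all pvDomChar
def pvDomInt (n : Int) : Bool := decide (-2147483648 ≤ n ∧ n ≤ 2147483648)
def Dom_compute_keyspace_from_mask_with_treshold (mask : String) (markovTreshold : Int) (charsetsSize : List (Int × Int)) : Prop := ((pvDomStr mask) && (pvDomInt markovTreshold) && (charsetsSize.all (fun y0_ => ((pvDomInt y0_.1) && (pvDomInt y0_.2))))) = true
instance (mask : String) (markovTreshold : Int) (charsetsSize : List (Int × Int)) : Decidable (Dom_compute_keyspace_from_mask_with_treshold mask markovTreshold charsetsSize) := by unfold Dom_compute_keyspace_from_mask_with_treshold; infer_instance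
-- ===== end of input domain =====

-- B drops A's nextCharSymbol state machine and A's dead charsetsSize/int(char) branch
-- (unreachable on A's returning inputs), pairing each '?' directly with the next character
-- and multiplying min(dict value, threshold) — simpler, same cost.

-- ===== PORT A =====
def pvKeyspaceDict : PySem.Dict Char Int :=
  PySem.Dict.ofList [('l',26),('u',26),('d',10),('h',16),('H',16),('s',33),('a',95),('b',256)]

-- A's for-loop with its nextCharSymbol flag; `pvKeyspaceDict.get? c = none` is where Python
-- raises TypeError on `None <= markovTreshold` (excluded by Pre_), the `.getD 0` there is arbitrary.
def pvALoop (markov : Int) (cs : List (Int × Int)) : List Char → Int → Bool → Int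
  | [], acc, _ => acc
  | c :: rest, acc, flag =>
    if flag then
      let v : Int := (pvKeyspaceDict.get? c).getD 0
      let m0 : Int := if v ≤ markov then v else markov
      let multiplier : Option Int :=
        match PySem.Int.ofStr? (String.mk [c]) with
        | some n => if 1 ≤ n ∧ n ≤ 4 then (PySem.Dict.mk cs).get? n else some m0
        | none => some m0                         -- ValueError caught: multiplier unchanged
      match multiplier with
      | none => pvALoop markov cs rest acc flag   -- `if not multiplier: continue` (flag NOT reset)
      | some m =>
        if m = 0 then pvALoop markov cs rest acc flag
        else pvALoop markov cs rest (acc * m) false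
    else if c = '?' then pvALoop markov cs rest acc true
    else pvALoop markov cs rest acc false

def compute_keyspace_from_mask_with_treshold (mask : String) (markovTreshold : Int) (charsetsSize : List (Int × Int)) : Int :=
  pvALoop markovTreshold charsetsSize mask.toList 1 false

-- ===== PORT B =====
-- Source B's fused iterator loop: a '?' consumes the next character (break if exhausted),
-- multiplies in min(keyspace_dict[sym], markovTreshold) unless that is zero.
-- (`keyspace_dict[sym]` raises KeyError on non-keys, outside Pre_; `.getD 0` there is arbitrary.)
def pvBLoop (markov : Int) : List Char → Int → Int
  | [], result => result
  | c :: rest, result =>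
    if c = '?' then
      match rest with
      | [] => result                              -- next(it, None) is None: break
      | sym :: rest' =>
        let m : Int := min ((pvKeyspaceDict.get? sym).getD 0) markov
        if m = 0 then pvBLoop markov rest' result
        else pvBLoop markov rest' (result * m)
    else pvBLoop markov rest result

def compute_keyspace_from_mask_with_treshold_alt (mask : String) (markovTreshold : Int) (charsetsSize : List (Int × Int)) : Int :=
  pvBLoop markovTreshold mask.toList 1

-- ===== PRECONDITION & SPEC =====
def pvKeys : List Char := ['l','u','d','h','H','s','a','b']

-- Pre_ is exactly where Python A returns: every char immediately following a '?' must be a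
-- keyspace_dict key (`None <= int` raises TypeError on a scored non-key char), and when
-- markovTreshold = 0 the multiplier 0 skips the flag reset, so every char after the FIRST '?'
-- gets scored and must be a key too.
def Pre_compute_keyspace_from_mask_with_treshold (mask : String) (markovTreshold : Int) (charsetsSize : List (Int × Int)) : Prop :=
  (∀ p ∈ mask.toList.zip mask.toList.tail, p.1 = '?' → p.2 ∈ pvKeys) ∧
  (markovTreshold = 0 → ∀ c ∈ (mask.toList.dropWhile (fun x => x != '?')).drop 1, c ∈ pvKeys)
instance (mask : String) (markovTreshold : Int) (charsetsSize : List (Int × Int)) : Decidable (Pre_compute_keyspace_from_mask_with_treshold mask markovTreshold charsetsSize) := by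
  unfold Pre_compute_keyspace_from_mask_with_treshold; infer_instance

def pvWitness_compute_keyspace_from_mask_with_treshold : String × Int × (List (Int × Int)) := ("?l?d", 26, [(1, 10)])

def Spec_compute_keyspace_from_mask_with_treshold (mask : String) (markovTreshold : Int) (charsetsSize : List (Int × Int)) (out : Int) : Prop := out = compute_keyspace_from_mask_with_treshold_alt mask markovTreshold charsetsSize
instance (mask : String) (markovTreshold : Int) (charsetsSize : List (Int × Int)) (out : Int) : Decidable (Spec_compute_keyspace_from_mask_with_treshold mask markovTreshold charsetsSize out) := by unfold Spec_compute_keyspace_from_mask_with_treshold; infer_instance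

-- ===== CLAIM (what is proved, stated in full; the proofs are below) =====
def Claim_equal_compute_keyspace_from_mask_with_treshold : Prop := ∀ (mask : String) (markovTreshold : Int) (charsetsSize : List (Int × Int)), Dom_compute_keyspace_from_mask_with_treshold mask markovTreshold charsetsSize → Pre_compute_keyspace_from_mask_with_treshold mask markovTreshold charsetsSize → Spec_compute_keyspace_from_mask_with_treshold mask markovTreshold charsetsSize (compute_keyspace_from_mask_with_treshold mask markovTreshold charsetsSize)

-- ===== LEMMAS AND PROOFS =====

-- proof-side helper: the characters A scores (each char following a '?', non-overlapping)
def pvScoredChars : List Char → List Char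
  | [] => []
  | c :: rest =>
    if c = '?' then
      match rest with
      | [] => []
      | d :: rest' => d :: pvScoredChars rest'
    else pvScoredChars rest

theorem pvPairs_tail (a : Char) (rest : List Char) :
    ∀ p ∈ rest.zip rest.tail, p ∈ (a :: rest).zip (a :: rest).tail := by
  cases rest with
  | nil => intro p hp; simp at hp
  | cons b t => intro p hp; exact List.mem_cons_of_mem _ hp

theorem pvScored_keys :
    ∀ (n : Nat) (l : List Char), l.length ≤ n →
      (∀ p ∈ l.zip l.tail, p.1 = '?' → p.2 ∈ pvKeys) →
      ∀ c ∈ pvScoredChars l, c ∈ pvKeys := by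
  intro n
  induction n with
  | zero =>
    intro l hl _ c hc
    have : l = [] := List.eq_nil_of_length_eq_zero (Nat.le_zero.mp hl)
    subst this; simp [pvScoredChars] at hc
  | succ n ih =>
    intro l hl hp c hc
    match l with
    | [] => simp [pvScoredChars] at hc
    | a :: rest =>
      by_cases ha : a = '?'
      · subst ha
        match rest with
        | [] => rw [pvScoredChars.eq_def] at hc; simp at hc
        | d :: rest' =>
          rw [pvScoredChars.eq_def] at hc
          simp only [if_pos rfl] at hc
          rcases List.mem_cons.mp hc with rfl | hc'
          · exact hp ('?', c) (by simp [List.zip]) rfl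
          · exact ih rest' (by simp at hl ⊢; omega)
              (fun p hpm => hp p (pvPairs_tail _ _ p (pvPairs_tail _ _ p hpm))) c hc'
      · rw [pvScoredChars.eq_def] at hc
        simp only [ha, if_false] at hc
        exact ih rest (by simp at hl; omega) (fun p hpm => hp p (pvPairs_tail _ _ p hpm)) c hc

def pvAfterFirstQ : List Char → List Char
  | [] => []
  | c :: rest => if c = '?' then rest else pvAfterFirstQ rest

theorem pvAfterFirstQ_eq : ∀ (l : List Char), pvAfterFirstQ l = (l.dropWhile (fun x => x != '?')).drop 1 := by
  intro l
  induction l with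
  | nil => rfl
  | cons c rest ih =>
    by_cases hc : c = '?'
    · subst hc; simp [pvAfterFirstQ, List.dropWhile]
    · have hb : (c != '?') = true := by simp [hc]
      rw [pvAfterFirstQ.eq_def]
      simp [hc, hb, List.dropWhile, ih]

theorem pvKey_facts (c : Char) (hc : c ∈ pvKeys) :
    (∃ v : Int, pvKeyspaceDict.get? c = some v ∧ 0 < v) ∧ PySem.Int.ofStr? (String.mk [c]) = none := by
  simp only [pvKeys, List.mem_cons, List.not_mem_nil, or_false] at hc
  rcases hc with rfl | rfl | rfl | rfl | rfl | rfl | rfl | rfl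
  · exact ⟨⟨26, by decide, by decide⟩, by decide⟩
  · exact ⟨⟨26, by decide, by decide⟩, by decide⟩
  · exact ⟨⟨10, by decide, by decide⟩, by decide⟩
  · exact ⟨⟨16, by decide, by decide⟩, by decide⟩
  · exact ⟨⟨16, by decide, by decide⟩, by decide⟩
  · exact ⟨⟨33, by decide, by decide⟩, by decide⟩
  · exact ⟨⟨95, by decide, by decide⟩, by decide⟩
  · exact ⟨⟨256, by decide, by decide⟩, by decide⟩

theorem pvA_cons_key (markov : Int) (cs : List (Int × Int)) (c : Char) (rest : List Char)
    (acc : Int) (hc : c ∈ pvKeys) (hm : markov ≠ 0) :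
    pvALoop markov cs (c :: rest) acc true
      = pvALoop markov cs rest (acc * min ((pvKeyspaceDict.get? c).getD 0) markov) false := by
  obtain ⟨⟨v, hv, hvpos⟩, hd⟩ := pvKey_facts c hc
  simp only [pvALoop, hv, hd, Option.getD_some, if_true, min_def]
  split_ifs with h1 h2 <;> first | rfl | omega

theorem pvB_cons_key (markov : Int) (c : Char) (rest : List Char)
    (acc : Int) (hc : c ∈ pvKeys) (hm : markov ≠ 0) :
    pvBLoop markov ('?' :: c :: rest) acc
      = pvBLoop markov rest (acc * min ((pvKeyspaceDict.get? c).getD 0) markov) := by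
  obtain ⟨⟨v, hv, hvpos⟩, _⟩ := pvKey_facts c hc
  simp only [pvBLoop, hv, Option.getD_some, if_pos rfl]
  have hne : ¬ (min v markov = 0) := by omega
  simp [hne]

theorem pvMain_ne (markov : Int) (cs : List (Int × Int)) (hm : markov ≠ 0) :
    ∀ (n : Nat) (l : List Char), l.length ≤ n → (∀ c ∈ pvScoredChars l, c ∈ pvKeys) →
      ∀ acc : Int, pvALoop markov cs l acc false = pvBLoop markov l acc := by
  intro n
  induction n with
  | zero =>
    intro l hl _ acc
    have : l = [] := List.eq_nil_of_length_eq_zero (Nat.le_zero.mp hl)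
    subst this; rfl
  | succ n ih =>
    intro l hl hkeys acc
    match l with
    | [] => rfl
    | c :: rest =>
      by_cases hc : c = '?'
      · subst hc
        match rest with
        | [] => simp [pvALoop, pvBLoop]
        | d :: rest' =>
          have hsc : pvScoredChars ('?' :: d :: rest') = d :: pvScoredChars rest' := by
            simp [pvScoredChars]
          have hd : d ∈ pvKeys := by
            apply hkeys; rw [hsc]; exact List.mem_cons_self ..
          have hkeys' : ∀ c ∈ pvScoredChars rest', c ∈ pvKeys := by
            intro x hx; apply hkeys; rw [hsc]; exact List.mem_cons_of_mem _ hx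
          have hstep : pvALoop markov cs ('?' :: d :: rest') acc false
              = pvALoop markov cs (d :: rest') acc true := by
            simp [pvALoop]
          rw [hstep, pvA_cons_key markov cs d rest' acc hd hm,
              pvB_cons_key markov d rest' acc hd hm]
          exact ih rest' (by simp at hl ⊢; omega) hkeys' _
      · have hstepB : pvBLoop markov (c :: rest) acc = pvBLoop markov rest acc := by
          rw [pvBLoop.eq_def]; simp [hc]
        have hstepA : pvALoop markov cs (c :: rest) acc false
            = pvALoop markov cs rest acc false := by
          simp [pvALoop, hc]
        have hkeys' : ∀ x ∈ pvScoredChars rest, x ∈ pvKeys := by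
          intro x hx; apply hkeys; rw [pvScoredChars.eq_def]; simpa [hc] using hx
        rw [hstepA, hstepB]
        exact ih rest (by simp at hl; omega) hkeys' acc

theorem pvA_zero_true (cs : List (Int × Int)) :
    ∀ (l : List Char), (∀ c ∈ l, c ∈ pvKeys) → ∀ acc : Int, pvALoop 0 cs l acc true = acc := by
  intro l
  induction l with
  | nil => intro _ _; rfl
  | cons c rest ih =>
    intro hk acc
    obtain ⟨⟨v, hv, hvpos⟩, hd⟩ := pvKey_facts c (hk c (List.mem_cons_self ..))
    have h0 : ¬ v ≤ (0 : Int) := by omega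
    simp only [pvALoop, hv, hd, Option.getD_some, if_true, h0, if_false]
    exact ih (fun x hx => hk x (List.mem_cons_of_mem _ hx)) acc

theorem pvA_zero_false (cs : List (Int × Int)) :
    ∀ (l : List Char), (∀ c ∈ pvAfterFirstQ l, c ∈ pvKeys) → ∀ acc : Int,
      pvALoop 0 cs l acc false = acc := by
  intro l
  induction l with
  | nil => intro _ _; rfl
  | cons c rest ih =>
    intro hk acc
    by_cases hc : c = '?'
    · subst hc
      have hstep : pvALoop 0 cs ('?' :: rest) acc false = pvALoop 0 cs rest acc true := by
        simp [pvALoop]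
      rw [hstep]
      exact pvA_zero_true cs rest (by simpa [pvAfterFirstQ] using hk) acc
    · have hstep : pvALoop 0 cs (c :: rest) acc false = pvALoop 0 cs rest acc false := by
        simp [pvALoop, hc]
      rw [hstep]
      exact ih (by simpa [pvAfterFirstQ, hc] using hk) acc

theorem pvB_zero :
    ∀ (n : Nat) (l : List Char), l.length ≤ n → (∀ c ∈ pvScoredChars l, c ∈ pvKeys) →
      ∀ acc : Int, pvBLoop 0 l acc = acc := by
  intro n
  induction n with
  | zero =>
    intro l hl _ acc
    have : l = [] := List.eq_nil_of_length_eq_zero (Nat.le_zero.mp hl)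
    subst this; rfl
  | succ n ih =>
    intro l hl hkeys acc
    match l with
    | [] => rfl
    | c :: rest =>
      by_cases hc : c = '?'
      · subst hc
        match rest with
        | [] => simp [pvBLoop]
        | d :: rest' =>
          have hsc : pvScoredChars ('?' :: d :: rest') = d :: pvScoredChars rest' := by
            simp [pvScoredChars]
          have hd : d ∈ pvKeys := by
            apply hkeys; rw [hsc]; exact List.mem_cons_self ..
          obtain ⟨⟨v, hv, hvpos⟩, _⟩ := pvKey_facts d hd
          have hmin : min v (0 : Int) = 0 := by omega
          have hkeys' : ∀ x ∈ pvScoredChars rest', x ∈ pvKeys := by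
            intro x hx; apply hkeys; rw [hsc]; exact List.mem_cons_of_mem _ hx
          simp only [pvBLoop, hv, Option.getD_some, if_pos rfl, hmin, if_true]
          exact ih rest' (by simp at hl ⊢; omega) hkeys' acc
      · have hstep : pvBLoop 0 (c :: rest) acc = pvBLoop 0 rest acc := by
          rw [pvBLoop.eq_def]; simp [hc]
        have hkeys' : ∀ x ∈ pvScoredChars rest, x ∈ pvKeys := by
          intro x hx; apply hkeys; rw [pvScoredChars.eq_def]; simpa [hc] using hx
        rw [hstep]
        exact ih rest (by simp at hl; omega) hkeys' acc

-- ===== VERDICT (by name: the statement is the Claim_ definition above) =====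
theorem compute_keyspace_from_mask_with_treshold_spec : Claim_equal_compute_keyspace_from_mask_with_treshold := by
  intro mask markov cs _ hpre
  unfold Spec_compute_keyspace_from_mask_with_treshold
  unfold compute_keyspace_from_mask_with_treshold compute_keyspace_from_mask_with_treshold_alt
  obtain ⟨hp1, hzero⟩ := hpre
  have hkeys : ∀ c ∈ pvScoredChars mask.toList, c ∈ pvKeys :=
    pvScored_keys mask.toList.length mask.toList le_rfl hp1
  by_cases hm : markov = 0
  · subst hm
    rw [pvA_zero_false cs mask.toList (by rw [pvAfterFirstQ_eq]; exact hzero rfl) 1,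
        pvB_zero mask.toList.length mask.toList le_rfl hkeys 1]
  · exact pvMain_ne markov cs hm mask.toList.length mask.toList le_rfl hkeys 1
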